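-- pv_equiv track=rewrite | github.com/whubsch/atlus_website | backend/app/process.py | manual_join
-- ===== SOURCE A (Python) =====
-- from collections import Counter
--
-- toss_tags = [
--     "Recipient",
--     "IntersectionSeparator",
--     "LandmarkName",
--     "USPSBoxGroupID",
--     "USPSBoxGroupType",
--     "USPSBoxID",
--     "USPSBoxType",
--     "OccupancyType",
-- ]
--
-- osm_mapping = {
--     "AddressNumber": "addr:housenumber",
--     "AddressNumberPrefix": "addr:housenumber",
--     "AddressNumberSuffix": "addr:housenumber",
--     "StreetName": "addr:street",
--     "StreetNamePreDirectional": "addr:street",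
--     "StreetNamePreModifier": "addr:street",
--     "StreetNamePreType": "addr:street",
--     "StreetNamePostDirectional": "addr:street",
--     "StreetNamePostModifier": "addr:street",
--     "StreetNamePostType": "addr:street",
--     "OccupancyIdentifier": "addr:unit",
--     "PlaceName": "addr:city",
--     "StateName": "addr:state",
--     "ZipCode": "addr:postcode",
-- }
--
-- def help_join(tags, keep: list[str]) -> str:
--     """Help to join address fields."""
--     tag_join: list[str] = [v for k, v in tags.items() if k in keep]
--     return " ".join(tag_join)
--
-- def addr_street(tags: dict[str, str]) -> str:
--     """Help build the street field."""
--     return help_join(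
--         tags,
--         [
--             "StreetName",
--             "StreetNamePreDirectional",
--             "StreetNamePreModifier",
--             "StreetNamePreType",
--             "StreetNamePostDirectional",
--             "StreetNamePostModifier",
--             "StreetNamePostType",
--         ],
--     )
--
-- def addr_housenumber(tags: dict[str, str]) -> str:
--     """Help build the housenumber field."""
--     return help_join(
--         tags, ["AddressNumberPrefix", "AddressNumber", "AddressNumberSuffix"]
--     )
--
-- def manual_join(parsed: list[tuple]) -> tuple[dict[str, str], list[str | None]]:
--     """Remove duplicates and join remaining fields."""
--     a = [i for i in parsed if i[1] not in toss_tags]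
--     counts = Counter([i[1] for i in a])
--     ok_tags = [tag for tag, count in counts.items() if count == 1]
--     ok_dict: dict[str, str] = {i[1]: i[0] for i in a if i[1] in ok_tags}
--     removed = [osm_mapping.get(field) for field, count in counts.items() if count > 1]
--
--     new_dict: dict[str, str | None] = {}
--     if "addr:street" not in removed:
--         new_dict["addr:street"] = addr_street(ok_dict)
--     if "addr:housenumber" not in removed:
--         new_dict["addr:housenumber"] = addr_housenumber(ok_dict)
--     if "addr:unit" not in removed:
--         new_dict["addr:unit"] = ok_dict.get("OccupancyIdentifier")
--     if "addr:city" not in removed: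
--         new_dict["addr:city"] = ok_dict.get("PlaceName")
--     if "addr:state" not in removed:
--         new_dict["addr:state"] = ok_dict.get("StateName")
--     if "addr:postcode" not in removed:
--         new_dict["addr:postcode"] = ok_dict.get("ZipCode")
--
--     return {k: v for k, v in new_dict.items() if v}, removed
-- ===== SOURCE B (Python) =====
-- from collections import Counter
--
-- toss_tags = [
--     "Recipient",
--     "IntersectionSeparator",
--     "LandmarkName",
--     "USPSBoxGroupID",
--     "USPSBoxGroupType",
--     "USPSBoxID",
--     "USPSBoxType",
--     "OccupancyType",
-- ]
--
-- osm_mapping = {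
--     "AddressNumber": "addr:housenumber",
--     "AddressNumberPrefix": "addr:housenumber",
--     "AddressNumberSuffix": "addr:housenumber",
--     "StreetName": "addr:street",
--     "StreetNamePreDirectional": "addr:street",
--     "StreetNamePreModifier": "addr:street",
--     "StreetNamePreType": "addr:street",
--     "StreetNamePostDirectional": "addr:street",
--     "StreetNamePostModifier": "addr:street",
--     "StreetNamePostType": "addr:street",
--     "OccupancyIdentifier": "addr:unit",
--     "PlaceName": "addr:city",
--     "StateName": "addr:state",
--     "ZipCode": "addr:postcode",
-- }
--
--
-- def manual_join(parsed):
--     """Remove duplicates and join remaining fields (single pass per OSM target)."""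
--     kept = [p for p in parsed if p[1] not in toss_tags]
--     counts = Counter(p[1] for p in kept)
--     removed = [osm_mapping.get(field) for field, count in counts.items() if count > 1]
--
--     out = {}
--     for target in ("addr:street", "addr:housenumber", "addr:unit",
--                    "addr:city", "addr:state", "addr:postcode"):
--         if target not in removed:
--             val = " ".join(v for v, f in kept
--                            if counts[f] == 1 and osm_mapping.get(f) == target)
--             if val:
--                 out[target] = val
--     return out, removed
-- ===== Notes on version B (the rewrite author's own statement) =====
-- stated objective: simpler
-- what changed: A builds ok_tags/ok_dict intermediates, per-key helper joins and a None-valued dict that is filtered afterwards; B makes one pass over the six OSM target keys and directly gathers and joins each target's single-occurrence source values via osm_mapping, emitting only truthy results.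
import Mathlib
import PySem

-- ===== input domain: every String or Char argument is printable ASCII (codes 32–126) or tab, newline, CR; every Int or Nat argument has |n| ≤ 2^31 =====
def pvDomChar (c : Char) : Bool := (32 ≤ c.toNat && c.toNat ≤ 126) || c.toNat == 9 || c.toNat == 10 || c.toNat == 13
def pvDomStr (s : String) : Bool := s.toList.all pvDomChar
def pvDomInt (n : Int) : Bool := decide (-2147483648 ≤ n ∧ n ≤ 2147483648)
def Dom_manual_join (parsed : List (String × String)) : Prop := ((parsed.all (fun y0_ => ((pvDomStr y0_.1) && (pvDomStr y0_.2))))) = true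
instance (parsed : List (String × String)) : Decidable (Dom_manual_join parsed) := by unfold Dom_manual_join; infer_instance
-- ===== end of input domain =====

-- B replaces A's ok_tags/ok_dict machinery and per-key helper joins by one pass over the six
-- OSM targets, gathering each target's single-occurrence source values directly (objective: simpler).

-- ===== PORT A =====
def toss_tags : List String :=
  ["Recipient", "IntersectionSeparator", "LandmarkName", "USPSBoxGroupID",
   "USPSBoxGroupType", "USPSBoxID", "USPSBoxType", "OccupancyType"]

-- a literal dict with distinct keys: its items list written down directly
def osm_mapping : PySem.Dict String String := PySem.Dict.mk
  [("AddressNumber", "addr:housenumber"),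
   ("AddressNumberPrefix", "addr:housenumber"),
   ("AddressNumberSuffix", "addr:housenumber"),
   ("StreetName", "addr:street"),
   ("StreetNamePreDirectional", "addr:street"),
   ("StreetNamePreModifier", "addr:street"),
   ("StreetNamePreType", "addr:street"),
   ("StreetNamePostDirectional", "addr:street"),
   ("StreetNamePostModifier", "addr:street"),
   ("StreetNamePostType", "addr:street"),
   ("OccupancyIdentifier", "addr:unit"),
   ("PlaceName", "addr:city"),
   ("StateName", "addr:state"),
   ("ZipCode", "addr:postcode")]

-- dicts whose keys are provably unique are carried as association lists (type convention);
-- [v for k, v in tags.items() if k in keep] joined with " "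
def help_join (tags : List (String × String)) (keep : List String) : String :=
  PySem.Str.join " " ((tags.filter (fun kv => keep.contains kv.1)).map (·.2))

def addr_street (tags : List (String × String)) : String :=
  help_join tags
    ["StreetName", "StreetNamePreDirectional", "StreetNamePreModifier",
     "StreetNamePreType", "StreetNamePostDirectional", "StreetNamePostModifier",
     "StreetNamePostType"]

def addr_housenumber (tags : List (String × String)) : String :=
  help_join tags ["AddressNumberPrefix", "AddressNumber", "AddressNumberSuffix"]

def manual_join (parsed : List (String × String)) : (List (String × String)) × List (Option String) :=
  let a := parsed.filter (fun i => !(toss_tags.contains i.2))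
  let counts := PySem.Dict.counter (a.map (·.2))
  let ok_tags := (counts.items.filter (fun tc => tc.2 == 1)).map (·.1)
  -- every field in ok_tags occurs exactly once in a, so the dict comprehension never
  -- overwrites: exact as an order-preserving filter
  let ok_dict : List (String × String) :=
    (a.filter (fun i => ok_tags.contains i.2)).map (fun i => (i.2, i.1))
  let removed := (counts.items.filter (fun tc => 1 < tc.2)).map (fun tc => osm_mapping.get? tc.1)
  -- ok_dict.get(k): keys are unique, so first-match lookup is exact
  let getOk := fun k => (ok_dict.find? (fun kv => kv.1 == k)).map (·.2)
  -- the six keys are distinct literals, so each dict assignment appends: exact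
  let new_dict : List (String × Option String) :=
    (if !(removed.contains (some "addr:street")) then [("addr:street", some (addr_street ok_dict))] else [])
    ++ (if !(removed.contains (some "addr:housenumber")) then [("addr:housenumber", some (addr_housenumber ok_dict))] else [])
    ++ (if !(removed.contains (some "addr:unit")) then [("addr:unit", getOk "OccupancyIdentifier")] else [])
    ++ (if !(removed.contains (some "addr:city")) then [("addr:city", getOk "PlaceName")] else [])
    ++ (if !(removed.contains (some "addr:state")) then [("addr:state", getOk "StateName")] else [])
    ++ (if !(removed.contains (some "addr:postcode")) then [("addr:postcode", getOk "ZipCode")] else [])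
  -- {k: v for k, v in new_dict.items() if v}: keys unique, truthy = some nonempty string
  (new_dict.filterMap (fun kv => match kv.2 with
      | some s => if s = "" then none else some (kv.1, s)
      | none => none),
   removed)

-- ===== PORT B =====
def pvTargets : List String :=
  ["addr:street", "addr:housenumber", "addr:unit", "addr:city", "addr:state", "addr:postcode"]

def manual_join_alt (parsed : List (String × String)) : (List (String × String)) × List (Option String) :=
  let kept := parsed.filter (fun i => !(toss_tags.contains i.2))
  let counts := PySem.Dict.counter (kept.map (·.2))
  let removed := (counts.items.filter (fun tc => 1 < tc.2)).map (fun tc => osm_mapping.get? tc.1)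
  let out := pvTargets.foldl (fun acc target =>
    if !(removed.contains (some target)) then
      let val := PySem.Str.join " "
        ((kept.filter (fun p => counts.getD p.2 0 == 1 && osm_mapping.get? p.2 == some target)).map (·.1))
      if !(val = "") then acc ++ [(target, val)] else acc
    else acc) []
  (out, removed)

-- ===== PRECONDITION & SPEC =====
def Spec_manual_join (parsed : List (String × String)) (out : (List (String × String)) × List (Option String)) : Prop := out = manual_join_alt parsed
instance (parsed : List (String × String)) (out : (List (String × String)) × List (Option String)) : Decidable (Spec_manual_join parsed out) := by unfold Spec_manual_join; infer_instance

-- ===== CLAIM (what is proved, stated in full; the proofs are below) =====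
def Claim_equal_manual_join : Prop := ∀ (parsed : List (String × String)), Dom_manual_join parsed → Spec_manual_join parsed (manual_join parsed)


-- ===== LEMMAS AND PROOFS =====

theorem count_contains (fields : List String) (f : String) :
    ((((PySem.Dict.counter fields).items.filter (fun tc => tc.2 == 1)).map (·.1)).contains f)
      = (fields.count f == 1) := by
  rw [PySem.Dict.items_counter, List.filter_map, List.map_map]
  rw [Bool.eq_iff_iff]
  simp only [List.contains_iff_mem, List.mem_map, List.mem_filter, Function.comp,
    PySem.Set.mem_ofList, beq_iff_eq]
  constructor
  · rintro ⟨k, ⟨hmem, hc⟩, rfl⟩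
    exact_mod_cast hc
  · intro h
    refine ⟨f, ⟨?_, by exact_mod_cast h⟩, rfl⟩
    have : 0 < fields.count f := by omega
    exact List.count_pos_iff.mp this

theorem getD_one (fields : List String) (f : String) :
    ((PySem.Dict.counter fields).getD f 0 == (1 : Int)) = (fields.count f == 1) := by
  rw [PySem.Dict.getD_counter, Bool.eq_iff_iff]
  simp

theorem osm_nodup : osm_mapping.keys.Nodup := by decide

theorem osm_get_street (f : String) :
    ((["StreetName", "StreetNamePreDirectional", "StreetNamePreModifier",
       "StreetNamePreType", "StreetNamePostDirectional", "StreetNamePostModifier",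
       "StreetNamePostType"] : List String).contains f)
      = (osm_mapping.get? f == some "addr:street") := by
  rw [Bool.eq_iff_iff]
  rw [List.contains_iff_mem, beq_iff_eq,
    PySem.Dict.get?_eq_some_iff_mem_items osm_mapping _ _ osm_nodup]
  simp [osm_mapping, Prod.ext_iff]

theorem osm_get_house (f : String) :
    ((["AddressNumberPrefix", "AddressNumber", "AddressNumberSuffix"] : List String).contains f)
      = (osm_mapping.get? f == some "addr:housenumber") := by
  rw [Bool.eq_iff_iff]
  rw [List.contains_iff_mem, beq_iff_eq,
    PySem.Dict.get?_eq_some_iff_mem_items osm_mapping _ _ osm_nodup]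
  simp [osm_mapping, Prod.ext_iff]
  tauto

theorem osm_get_single (f k t : String)
    (hkt : (k, t) ∈ ([("OccupancyIdentifier", "addr:unit"), ("PlaceName", "addr:city"),
                      ("StateName", "addr:state"), ("ZipCode", "addr:postcode")] : List (String × String))) :
    (osm_mapping.get? f == some t) = (f == k) := by
  rw [Bool.eq_iff_iff, beq_iff_eq, beq_iff_eq,
    PySem.Dict.get?_eq_some_iff_mem_items osm_mapping _ _ osm_nodup]
  simp only [List.mem_cons, List.not_mem_nil, or_false, Prod.mk.injEq] at hkt
  obtain ⟨rfl, rfl⟩ | ⟨rfl, rfl⟩ | ⟨rfl, rfl⟩ | ⟨rfl, rfl⟩ := hkt <;>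
    simp [osm_mapping, Prod.ext_iff]

theorem join_val (kept : List (String × String)) (keep : List String) (t : String)
    (hk : ∀ f, keep.contains f = (osm_mapping.get? f == some t)) :
    help_join ((kept.filter (fun i =>
        ((((PySem.Dict.counter (kept.map (·.2))).items.filter (fun tc => tc.2 == 1)).map (·.1)).contains i.2))).map
        (fun i => (i.2, i.1))) keep
      = PySem.Str.join " " ((kept.filter (fun p =>
          (PySem.Dict.counter (kept.map (·.2))).getD p.2 0 == 1
            && osm_mapping.get? p.2 == some t)).map (·.1)) := by
  unfold help_join
  rw [List.filter_map, List.map_map, List.filter_filter]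
  simp only [Function.comp]
  have hcmp : ((fun x : String × String => x.2) ∘ fun i : String × String => (i.2, i.1))
      = fun x : String × String => x.1 := rfl
  rw [hcmp]
  refine congrArg _ (congrArg _ (List.filter_congr ?_))
  intro p _
  rw [hk p.2, count_contains, getD_one, Bool.and_comm]

theorem chunk_some (t v : String) :
    (List.filterMap (fun kv : String × Option String => match kv.2 with
        | some s => if s = "" then none else some (kv.1, s)
        | none => none) [(t, some v)])
      = if !(v = "") then [(t, v)] else [] := by
  by_cases hv : v = "" <;> simp [hv]

theorem single_val (kept : List (String × String)) (k t : String)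
    (hk : ∀ f, (osm_mapping.get? f == some t) = (f == k)) :
    (List.filterMap (fun kv : String × Option String => match kv.2 with
        | some s => if s = "" then none else some (kv.1, s)
        | none => none)
      [(t, ((((kept.filter (fun i =>
          ((((PySem.Dict.counter (kept.map (·.2))).items.filter (fun tc => tc.2 == 1)).map (·.1)).contains i.2))).map
          (fun i => (i.2, i.1))).find? (fun kv => kv.1 == k)).map (·.2)))])
      = (if !(PySem.Str.join " " ((kept.filter (fun p =>
            (PySem.Dict.counter (kept.map (·.2))).getD p.2 0 == 1
              && osm_mapping.get? p.2 == some t)).map (·.1)) = "")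
         then [(t, PySem.Str.join " " ((kept.filter (fun p =>
            (PySem.Dict.counter (kept.map (·.2))).getD p.2 0 == 1
              && osm_mapping.get? p.2 == some t)).map (·.1)))]
         else []) := by
  have hpred : ∀ p : String × String,
      ((PySem.Dict.counter (kept.map (·.2))).getD p.2 0 == 1 && osm_mapping.get? p.2 == some t)
        = ((kept.map (·.2)).count p.2 == 1 && p.2 == k) := by
    intro p; rw [getD_one, hk p.2]
  rw [List.filter_congr (fun p _ => hpred p)]
  rw [List.find?_map]
  have hc1 : ((fun kv : String × String => kv.1 == k) ∘ fun i : String × String => (i.2, i.1))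
      = fun p : String × String => p.2 == k := rfl
  rw [hc1, ← List.head?_filter, List.filter_filter]
  have hc2 : (fun a : String × String => (a.2 == k) &&
      ((((PySem.Dict.counter (kept.map (·.2))).items.filter (fun tc => tc.2 == 1)).map (·.1)).contains a.2))
      = fun p : String × String => (kept.map (·.2)).count p.2 == 1 && p.2 == k := by
    funext a; rw [count_contains, Bool.and_comm]
  rw [hc2]
  set l := kept.filter (fun p : String × String => (kept.map (·.2)).count p.2 == 1 && p.2 == k) with hl
  have hlen : l.length ≤ 1 := by
    by_cases hc : (kept.map (·.2)).count k = 1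
    · rw [hl, ← List.countP_eq_length_filter]
      calc kept.countP (fun p : String × String => (kept.map (·.2)).count p.2 == 1 && p.2 == k)
            ≤ (kept.countP (fun p => p.2 == k)) := by
            apply List.countP_mono_left
            intro a _ ha
            exact (Bool.and_elim_right ha)
          _ = (kept.map (·.2)).count k := by
            rw [List.count, List.countP_map]; rfl
          _ ≤ 1 := le_of_eq hc
    · have : l = [] := by
        rw [hl, List.filter_eq_nil_iff]
        intro a _ ha
        have h2 : (a.2 == k) = true := Bool.and_elim_right ha
        have h1 : ((kept.map (·.2)).count a.2 == 1) = true := Bool.and_elim_left ha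
        rw [eq_of_beq h2] at h1
        exact hc (by simpa using h1)
      simp [this]
  match hL : l with
  | [] => simp [show PySem.Str.join " " ([] : List String) = "" from rfl]
  | [p] =>
    simp only [List.head?_cons, Option.map_some, List.map_cons, List.map_nil]
    have hjoin : PySem.Str.join " " [p.1] = p.1 := by
      simp [PySem.Str.join, PySem.Chars.join_singleton]
    simp only [hjoin]
    by_cases hp : p.1 = "" <;> simp [hp, List.filterMap]
  | p :: q :: tl => simp at hlen

-- proof-only helpers: the value B joins for one OSM target, and one emitted block
def bval (kept : List (String × String)) (tg : String) : String :=
  PySem.Str.join " " ((kept.filter (fun p =>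
    (PySem.Dict.counter (kept.map (·.2))).getD p.2 0 == 1
      && osm_mapping.get? p.2 == some tg)).map (·.1))

def bchunk (kept : List (String × String)) (removed : List (Option String)) (tg : String) :
    List (String × String) :=
  if (!removed.contains (some tg)) = true then
    (if !(bval kept tg = "") then [(tg, bval kept tg)] else []) else []

-- ===== VERDICT (by name: the statement is the Claim_ definition above) =====
theorem manual_join_spec : Claim_equal_manual_join := by
  intro parsed _
  unfold Spec_manual_join manual_join manual_join_alt
  generalize parsed.filter (fun i => !(toss_tags.contains i.2)) = kept
  dsimp only
  generalize ((PySem.Dict.counter (kept.map (·.2))).items.filter (fun tc => decide (1 < tc.2))).map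
      (fun tc => osm_mapping.get? tc.1) = removed
  have hbv : ∀ tg : String, PySem.Str.join " " ((kept.filter (fun p =>
      (PySem.Dict.counter (kept.map (·.2))).getD p.2 0 == 1
        && osm_mapping.get? p.2 == some tg)).map (·.1)) = bval kept tg := fun _ => rfl
  congr 1
  -- B side: each loop iteration appends one independent block
  · have hstep : ∀ (acc : List (String × String)) (tg : String),
        (if (!removed.contains (some tg)) = true then
          (if (!decide ((bval kept tg) = "")) = true then acc ++ [(tg, bval kept tg)] else acc)
        else acc) = acc ++ bchunk kept removed tg := by
      intro acc tg
      by_cases h1 : some tg ∈ removed <;> by_cases h2 : bval kept tg = "" <;>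
        simp [bchunk, h1, h2]
    simp only [hbv]
    rw [PySem.List.foldl_congr_mem pvTargets _ (fun acc tg => acc ++ bchunk kept removed tg) []
      (fun acc x _ => hstep acc x)]
    rw [PySem.List.foldl_append_eq_flatMap]
    simp only [pvTargets, List.flatMap_cons, List.flatMap_nil, List.nil_append, List.append_nil]
    -- A side: distribute the truthiness filter over the six blocks
    simp only [List.filterMap_append]
    simp only [apply_ite (List.filterMap (fun kv : String × Option String => match kv.2 with
        | some s => if s = "" then none else some (kv.1, s) | none => none)), List.filterMap_nil]
    simp only [addr_street, addr_housenumber]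
    rw [join_val kept _ _ osm_get_street, join_val kept _ _ osm_get_house]
    rw [single_val kept "OccupancyIdentifier" "addr:unit" (fun f => osm_get_single f _ _ (by simp)),
      single_val kept "PlaceName" "addr:city" (fun f => osm_get_single f _ _ (by simp)),
      single_val kept "StateName" "addr:state" (fun f => osm_get_single f _ _ (by simp)),
      single_val kept "ZipCode" "addr:postcode" (fun f => osm_get_single f _ _ (by simp))]
    simp only [chunk_some]
    simp only [bchunk, hbv, List.append_assoc]
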